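-- pv_equiv track=rewrite | github.com/happybhati/workstream | agentic_readiness/scanner.py | _find_file_in_tree
-- ===== SOURCE A (Python) =====
-- def _find_file_in_tree(tree: list[str], filename: str) -> str | None:
--     """Find the best match for a filename in the tree (case-insensitive root match first)."""
--     lower = filename.lower()
--     for path in tree:
--         if path.lower() == lower:
--             return path
--     for path in tree:
--         if path.lower().endswith("/" + lower):
--             return path
--     return None
-- ===== SOURCE B (Python) =====
-- def _find_file_in_tree(tree: list[str], filename: str) -> str | None:
--     """Single pass: return on exact case-insensitive match, else first suffix match."""
--     lower = filename.lower()
--     suffix_match = None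
--     for path in tree:
--         pl = path.lower()
--         if pl == lower:
--             return path
--         if suffix_match is None and pl.endswith("/" + lower):
--             suffix_match = path
--     return suffix_match
-- ===== Notes on version B (the rewrite author's own statement) =====
-- stated objective: alternative
-- what changed: A makes two separate scans of the tree (exact-match pass, then suffix pass); B makes a single pass that returns immediately on an exact match while remembering the first suffix match in an accumulator.
import Mathlib
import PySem

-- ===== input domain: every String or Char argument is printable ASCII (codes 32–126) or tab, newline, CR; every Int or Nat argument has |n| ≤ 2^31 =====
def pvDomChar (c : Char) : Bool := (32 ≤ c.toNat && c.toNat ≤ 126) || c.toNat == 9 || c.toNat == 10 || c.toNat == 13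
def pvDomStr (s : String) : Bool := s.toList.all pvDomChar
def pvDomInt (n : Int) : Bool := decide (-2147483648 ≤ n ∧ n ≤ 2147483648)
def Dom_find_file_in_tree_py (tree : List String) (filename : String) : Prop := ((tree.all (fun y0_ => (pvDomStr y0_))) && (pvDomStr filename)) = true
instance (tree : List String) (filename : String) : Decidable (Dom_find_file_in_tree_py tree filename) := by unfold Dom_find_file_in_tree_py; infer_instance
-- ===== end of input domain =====

-- B replaces A's two sequential scans by one pass that keeps the first suffix match as
-- accumulator state and returns immediately on an exact match (objective: alternative).

-- ===== PORT A =====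
-- first loop of A: return the first path whose lowercase equals `lower`
def ffExactLoop (lower : String) : List String → Option String
  | [] => none
  | p :: rest => if PySem.Str.lower p == lower then some p else ffExactLoop lower rest

-- second loop of A: return the first path whose lowercase ends with "/" + lower
def ffSuffixLoop (lower : String) : List String → Option String
  | [] => none
  | p :: rest =>
      if PySem.Str.endswith (PySem.Str.lower p) ("/" ++ lower) then some p
      else ffSuffixLoop lower rest

def find_file_in_tree_py (tree : List String) (filename : String) : Option String :=
  let lower := PySem.Str.lower filename
  match ffExactLoop lower tree with
  | some p => some p
  | none => ffSuffixLoop lower tree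

-- ===== PORT B =====
-- single pass with accumulator: exact match returns at once; first suffix match is kept
def ffAltLoop (lower : String) : List String → Option String → Option String
  | [], suffix_match => suffix_match
  | p :: rest, suffix_match =>
      let pl := PySem.Str.lower p
      if pl == lower then some p
      else
        ffAltLoop lower rest
          (if suffix_match.isNone && PySem.Str.endswith pl ("/" ++ lower) then some p
           else suffix_match)

def find_file_in_tree_py_alt (tree : List String) (filename : String) : Option String :=
  ffAltLoop (PySem.Str.lower filename) tree none

-- ===== PRECONDITION & SPEC =====
def Spec_find_file_in_tree_py (tree : List String) (filename : String) (out : Option String) : Prop := out = find_file_in_tree_py_alt tree filename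
instance (tree : List String) (filename : String) (out : Option String) : Decidable (Spec_find_file_in_tree_py tree filename out) := by unfold Spec_find_file_in_tree_py; infer_instance

-- ===== CLAIM (what is proved, stated in full; the proofs are below) =====
def Claim_equal_find_file_in_tree_py : Prop := ∀ (tree : List String) (filename : String), Dom_find_file_in_tree_py tree filename → Spec_find_file_in_tree_py tree filename (find_file_in_tree_py tree filename)

-- ===== LEMMAS AND PROOFS =====

-- loop invariant: one pass with accumulator = exact pass, else accumulator, else suffix pass
theorem ffAltLoop_eq (lower : String) (l : List String) (acc : Option String) :
    ffAltLoop lower l acc =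
      match ffExactLoop lower l with
      | some p => some p
      | none => match acc with
                | some a => some a
                | none => ffSuffixLoop lower l := by
  induction l generalizing acc with
  | nil => cases acc <;> simp [ffAltLoop, ffExactLoop, ffSuffixLoop]
  | cons p rest ih =>
      simp only [ffAltLoop, ffExactLoop, ffSuffixLoop]
      by_cases he : PySem.Str.lower p == lower
      · simp [he]
      · simp only [he]
        cases acc with
        | some a => simp [ih]
        | none =>
            rw [ih]
            cases ffExactLoop lower rest
            · by_cases hc : PySem.Chars.endswith (PySem.Chars.lower p.toList) ('/' :: lower.toList) = true <;> simp [hc]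
            · simp

-- ===== VERDICT (by name: the statement is the Claim_ definition above) =====
theorem find_file_in_tree_py_spec : Claim_equal_find_file_in_tree_py := by
  intro tree filename _
  unfold Spec_find_file_in_tree_py find_file_in_tree_py find_file_in_tree_py_alt
  rw [ffAltLoop_eq]
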